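-- pv_equiv track=rewrite | github.com/e-lua/cenexal-team | utils/split_text_by_bytes.py | split_text_by_bytes
-- ===== SOURCE A (Python) =====
-- def split_text_by_bytes(text:str, max_size: int):
--
--     fragments = []
--     start = 0
--     while start < len(text):
--         finish = start + max_size
--
--         # Adjustment to not count table rows
--         if finish < len(text):
--             # Find the end of the last complete row before the limit
--             finish = text.rfind("\n", start, finish) + 1  # +1 for including the line break
--
--             # Make sure not to cut off the header
--             if finish <= start:
--                 finish = start + max_size  #Fallback if there is no clean break
--
--         fragments.append(text[start:finish])
--         start = finish
--
--     return fragments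
-- ===== SOURCE B (Python) =====
-- def split_text_by_bytes(text: str, max_size: int):
--     # Split into lines (keeping each '\n'), then greedily pack lines into fragments.
--     parts = text.split("\n")
--     lines = [p + "\n" for p in parts[:-1]]
--     if parts[-1]:
--         lines.append(parts[-1])
--
--     fragments = []
--     acc = ""
--     for line in lines:
--         if len(acc) + len(line) <= max_size:
--             acc += line
--         else:
--             if acc:
--                 fragments.append(acc)
--             if len(line) <= max_size:
--                 acc = line
--             else:
--                 while len(line) > max_size:
--                     fragments.append(line[:max_size])
--                     line = line[max_size:]
--                 acc = line
--     if acc: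
--         fragments.append(acc)
--     return fragments
-- ===== Notes on version B (the rewrite author's own statement) =====
-- stated objective: alternative
-- what changed: A scans the text with a start/finish index window, calling rfind('\n') on each window to decide every cut; B splits the text once into newline-terminated lines and makes one greedy pass packing whole lines into fragments, slicing a line into max_size-sized chunks only when it alone exceeds the limit.
import Mathlib
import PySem

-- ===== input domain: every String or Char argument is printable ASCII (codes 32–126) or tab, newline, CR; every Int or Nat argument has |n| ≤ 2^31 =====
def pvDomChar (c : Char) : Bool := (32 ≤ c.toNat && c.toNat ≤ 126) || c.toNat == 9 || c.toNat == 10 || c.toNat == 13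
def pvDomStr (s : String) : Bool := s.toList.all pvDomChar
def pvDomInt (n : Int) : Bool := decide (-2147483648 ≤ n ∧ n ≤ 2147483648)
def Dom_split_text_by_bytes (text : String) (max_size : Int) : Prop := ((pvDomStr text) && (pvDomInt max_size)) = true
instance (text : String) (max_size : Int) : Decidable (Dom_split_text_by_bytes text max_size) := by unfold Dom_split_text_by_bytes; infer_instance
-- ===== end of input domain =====

-- B re-implements A's sliding-window/rfind splitter as a split-into-lines + greedy line-packing
-- pass (same return value; alternative decomposition, not claimed faster).

-- ===== PORT A =====
-- A's while-loop over start/finish indices; fuel = |text|+1 bounds the iteration count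
-- (each iteration advances start by at least 1 when max_size ≥ 1, which Pre_ guarantees).
def splitA_loop (cs : List Char) (max_size : Int) : Nat → Int → List (List Char)
  | 0, _ => []
  | fuel+1, start =>
    if start < PySem.Chars.len cs then
      let finish := start + max_size
      let finish :=
        if finish < PySem.Chars.len cs then
          -- finish = text.rfind("\n", start, finish) + 1
          let f := PySem.Chars.rfindFrom cs ['\n'] start (some finish) + 1
          if f ≤ start then start + max_size else f
        else finish
      PySem.Chars.slice cs (some start) (some finish) :: splitA_loop cs max_size fuel finish
    else []

def split_text_by_bytes (text : String) (max_size : Int) : List String :=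
  (splitA_loop text.toList max_size (text.toList.length + 1) 0).map String.ofList

-- ===== PORT B =====
-- while len(line) > max_size: fragments.append(line[:max_size]); line = line[max_size:]
-- fuel = |line| bounds the iteration count when max_size ≥ 1 (Pre_).
def splitB_chunk (m : Int) : Nat → List (List Char) → List Char → List (List Char) × List Char
  | 0, frags, line => (frags, line)
  | fuel+1, frags, line =>
    if m < PySem.Chars.len line then
      splitB_chunk m fuel (frags ++ [PySem.Chars.slice line none (some m)])
        (PySem.Chars.slice line (some m) none)
    else (frags, line)

-- one iteration of B's for-loop over the lines, state = (fragments, acc)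
def splitB_step (m : Int) (st : List (List Char) × List Char) (line : List Char) :
    List (List Char) × List Char :=
  if PySem.Chars.len st.2 + PySem.Chars.len line ≤ m then (st.1, st.2 ++ line)
  else
    let frags := if st.2 ≠ [] then st.1 ++ [st.2] else st.1
    if PySem.Chars.len line ≤ m then (frags, line)
    else splitB_chunk m line.length frags line

def split_text_by_bytes_alt (text : String) (max_size : Int) : List String :=
  let parts := PySem.Chars.splitOn text.toList ['\n']             -- text.split("\n")
  let lines := (PySem.List.slice parts none (some (-1))).map (fun p => p ++ ['\n'])
  let lines := lines ++
    (if PySem.List.pyGetD parts (-1) [] ≠ [] then [PySem.List.pyGetD parts (-1) []] else [])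
  let st := lines.foldl (splitB_step max_size) ([], [])
  (if st.2 ≠ [] then st.1 ++ [st.2] else st.1).map String.ofList

-- ===== PRECONDITION & SPEC =====
-- Pre_ excludes nonempty text with max_size ≤ 0: there A's loop never advances `start`
-- (and B's chunking loop never shrinks the line), so the Python A does not return at all.
def Pre_split_text_by_bytes (text : String) (max_size : Int) : Prop :=
  text = "" ∨ 1 ≤ max_size
instance (text : String) (max_size : Int) : Decidable (Pre_split_text_by_bytes text max_size) := by
  unfold Pre_split_text_by_bytes; infer_instance

def pvWitness_split_text_by_bytes : String × Int := ("ab\ncd", 3)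

def Spec_split_text_by_bytes (text : String) (max_size : Int) (out : List String) : Prop := out = split_text_by_bytes_alt text max_size
instance (text : String) (max_size : Int) (out : List String) : Decidable (Spec_split_text_by_bytes text max_size out) := by unfold Spec_split_text_by_bytes; infer_instance

-- ===== CLAIM (what is proved, stated in full; the proofs are below) =====
def Claim_equal_split_text_by_bytes : Prop := ∀ (text : String) (max_size : Int), Dom_split_text_by_bytes text max_size → Pre_split_text_by_bytes text max_size → Spec_split_text_by_bytes text max_size (split_text_by_bytes text max_size)

-- ===== LEMMAS AND PROOFS =====

-- index of the LAST newline of a list, if any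
def lastNL : List Char → Option Nat
  | [] => none
  | c :: cs =>
    match lastNL cs with
    | some j => some (j + 1)
    | none => if c = '\n' then some 0 else none

-- where A cuts its next fragment out of the remaining suffix r (m = max_size)
def cutPos (m : Nat) (r : List Char) : Nat :=
  if r.length ≤ m then r.length
  else
    match lastNL (r.take m) with
    | some j => j + 1
    | none => m

-- totalised cut (= cutPos whenever 1 ≤ m)
def cutK (m : Nat) (r : List Char) : Nat := max 1 (cutPos m r)

-- suffix-level view of A's loop
def fSpec (m : Nat) (r : List Char) : List (List Char) :=
  if h : r = [] then []
  else r.take (cutK m r) :: fSpec m (r.drop (cutK m r))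
termination_by r.length
decreasing_by
  simp only [List.length_drop]
  have h1 : 1 ≤ cutK m r := le_max_left _ _
  have h2 : r.length ≠ 0 := fun hn => h (List.eq_nil_of_length_eq_zero hn)
  omega

-- split text into its lines, each keeping its '\n' (the last may lack it)
def toLines : List Char → List (List Char)
  | [] => []
  | c :: cs =>
    if c = '\n' then ['\n'] :: toLines cs
    else
      match toLines cs with
      | [] => [[c]]
      | l :: ls => (c :: l) :: ls

-- shape invariant of toLines output
def goodLines : List (List Char) → Prop
  | [] => True
  | l :: ls => l ≠ [] ∧ '\n' ∉ l.dropLast ∧ (ls ≠ [] → l.getLast? = some '\n') ∧ goodLines ls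

-- proof-side chunking of one oversized line
def chunks (m : Nat) (L : List Char) : List (List Char) × List Char :=
  if h : m < L.length ∧ 1 ≤ m then
    let p := chunks m (L.drop m)
    (L.take m :: p.1, p.2)
  else ([], L)
termination_by L.length
decreasing_by simp only [List.length_drop]; omega

-- B's final append of the open accumulator
def finishB (st : List (List Char) × List Char) : List (List Char) :=
  if st.2 ≠ [] then st.1 ++ [st.2] else st.1

-- reference form of Python's text.split('\n')
def consHead (p : List Char) : List (List Char) → List (List Char)
  | [] => [p]
  | q :: qs => (p ++ q) :: qs

def mySplit : List Char → List (List Char)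
  | [] => [[]]
  | c :: rest => if c = '\n' then [] :: mySplit rest else consHead [c] (mySplit rest)

-- line list B derives from the split parts
def linesOf : List (List Char) → List (List Char)
  | [] => []
  | [p] => if p ≠ [] then [p] else []
  | p :: ps => (p ++ ['\n']) :: linesOf ps

-- ---- generic list helpers ----
theorem pvGetLast?_append_right (l1 l2 : List Char) (h : l2 ≠ []) :
    (l1 ++ l2).getLast? = l2.getLast? := by
  obtain ⟨a, ha⟩ : ∃ a, l2.getLast? = some a := by
    cases hE : l2.getLast? with
    | some a => exact ⟨a, rfl⟩
    | none => exact absurd (List.getLast?_eq_none_iff.mp hE) h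
  obtain ⟨ys, rfl⟩ := List.getLast?_eq_some_iff.mp ha
  rw [ha, ← List.append_assoc, List.getLast?_concat]

theorem pvGetLast?_drop_of_lt (l : List Char) (n : Nat) (h : n < l.length) :
    (l.drop n).getLast? = l.getLast? := by
  conv_rhs => rw [← List.take_append_drop n l]
  rw [pvGetLast?_append_right]
  intro hn
  have := congrArg List.length hn
  simp at this
  omega

theorem pvNotNL_take (L : List Char) (t : Nat) (ht : t < L.length) (h : '\n' ∉ L.dropLast) :
    '\n' ∉ L.take t := by
  have he : L.take t = L.dropLast.take t := by
    rw [List.dropLast_eq_take, List.take_take]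
    congr 1
    omega
  intro hm
  exact h (List.take_subset _ _ (he ▸ hm))

theorem pvDropLast_drop (L : List Char) (n : Nat) :
    (L.drop n).dropLast = L.dropLast.drop n := by
  rw [List.dropLast_eq_take, List.dropLast_eq_take, List.drop_take]
  congr 1
  simp
  omega

-- ---- lastNL lemmas ----
theorem lastNL_append (xs ys : List Char) :
    lastNL (xs ++ ys) =
      match lastNL ys with
      | some j => some (xs.length + j)
      | none => lastNL xs := by
  induction xs with
  | nil => cases h : lastNL ys <;> simp [h, lastNL]
  | cons c cs ih =>
    simp only [List.cons_append, lastNL, ih]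
    cases h : lastNL ys <;> cases h2 : lastNL cs <;>
      simp [lastNL, h, h2] <;> omega

theorem lastNL_eq_none_iff (w : List Char) : lastNL w = none ↔ '\n' ∉ w := by
  induction w with
  | nil => simp [lastNL]
  | cons c cs ih =>
    simp only [lastNL]
    cases h : lastNL cs with
    | some j => simp [h] at ih; simp [ih]
    | none =>
      simp [h] at ih
      by_cases hc : c = '\n' <;> simp [hc, ih, eq_comm]

theorem lastNL_lt_length (w : List Char) (j : Nat) (h : lastNL w = some j) : j < w.length := by
  induction w generalizing j with
  | nil => simp [lastNL] at h
  | cons c cs ih =>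
    simp only [lastNL] at h
    cases h2 : lastNL cs with
    | some j' =>
      rw [h2] at h
      simp at h
      have := ih j' h2
      simp
      omega
    | none =>
      rw [h2] at h
      by_cases hc : c = '\n' <;> simp [hc] at h
      simp [← h]

theorem lastNL_getLast_newline (w : List Char) (h : w.getLast? = some '\n') :
    lastNL w = some (w.length - 1) := by
  obtain ⟨ys, rfl⟩ := List.getLast?_eq_some_iff.mp h
  rw [lastNL_append]
  simp [lastNL]

theorem lastNL_take_succ (w : List Char) (k : Nat) :
    lastNL (w.take (k+1)) = if w[k]? = some '\n' then some k else lastNL (w.take k) := by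
  have hsingle : ∀ c : Char, lastNL [c] = if c = '\n' then some 0 else none := fun _ => rfl
  by_cases hk : k < w.length
  · rw [List.take_succ, List.getElem?_eq_getElem hk]
    simp only [Option.toList_some]
    rw [lastNL_append, hsingle]
    by_cases hc : w[k] = '\n'
    · rw [if_pos hc, if_pos (by rw [hc])]
      show some ((w.take k).length + 0) = some k
      rw [Nat.add_zero, List.length_take]
      congr 1
      omega
    · rw [if_neg hc, if_neg (by simp [hc])]
  · have hge : w.length ≤ k := by omega
    rw [List.take_of_length_le (by omega), List.take_of_length_le hge,
      List.getElem?_eq_none hge]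
    simp

-- ---- rfind characterisation ----
theorem singleton_isPrefixOf (w : List Char) :
    (['\n'].isPrefixOf w = true) ↔ w[0]? = some '\n' := by
  cases w with
  | nil => simp [List.isPrefixOf]
  | cons c cs =>
    simp [List.isPrefixOf]
    exact eq_comm

theorem rfind_go_eq (w : List Char) (k : Nat) :
    PySem.Chars.rfind.go w ['\n'] k =
      match lastNL (w.take (k+1)) with
      | some j => (j : Int)
      | none => -1 := by
  induction k with
  | zero =>
    rw [PySem.Chars.rfind.go.eq_1]
    rw [show (1:Nat) = 0 + 1 from rfl, lastNL_take_succ]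
    by_cases h0 : w[0]? = some '\n'
    · rw [if_pos ((singleton_isPrefixOf w).mpr h0), if_pos h0]
      rfl
    · rw [if_neg (fun hp => h0 ((singleton_isPrefixOf w).mp hp)), if_neg h0]
      rfl
  | succ j ih =>
    rw [PySem.Chars.rfind.go.eq_2]
    rw [lastNL_take_succ]
    have hidx : (w.drop (j+1))[0]? = w[j+1]? := by
      rw [List.getElem?_drop]
    by_cases h0 : w[j+1]? = some '\n'
    · rw [if_pos ((singleton_isPrefixOf _).mpr (hidx.trans h0)), if_pos h0]
    · rw [if_neg (fun hp => h0 (hidx ▸ (singleton_isPrefixOf _).mp hp)), if_neg h0, ih]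

theorem rfind_none (w : List Char) (h : lastNL w = none) :
    PySem.Chars.rfind w ['\n'] = -1 := by
  have hgo := rfind_go_eq w w.length
  rw [List.take_of_length_le (by omega), h] at hgo
  exact hgo

theorem rfind_some (w : List Char) (j : Nat) (h : lastNL w = some j) :
    PySem.Chars.rfind w ['\n'] = (j : Int) := by
  have hgo := rfind_go_eq w w.length
  rw [List.take_of_length_le (by omega), h] at hgo
  exact hgo

theorem rfindFrom_pre (cs : List Char) (start m : Nat)
    (h : (start : Int) + m < (cs.length : Int)) :
    PySem.Chars.rfindFrom cs ['\n'] start (some ((start : Int) + m)) =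
      (if PySem.Chars.rfind ((cs.drop start).take m) ['\n'] = -1 then (-1 : Int)
       else (start : Int) + PySem.Chars.rfind ((cs.drop start).take m) ['\n']) := by
  have h1 : ¬ ((cs.length : Int) < (start : Int) + m) := by omega
  have h2 : ¬ ((start : Int) + (m : Int) < 0) := by omega
  have h3 : ¬ ((start : Int) < 0) := by omega
  have h4 : ¬ ((start : Int) + (m : Int) < (start : Int)) := by omega
  unfold PySem.Chars.rfindFrom
  simp only [if_neg h1, if_neg h2, if_neg h3, if_neg h4]
  have ht : ((start : Int) + (m : Int)).toNat = start + m := by omega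
  have hs : ((start : Int)).toNat = start := by omega
  rw [ht, hs, List.drop_take]
  have hmm : start + m - start = m := by omega
  rw [hmm]

theorem rfindFrom_window_none (cs : List Char) (start m : Nat)
    (h : (start : Int) + m < (cs.length : Int))
    (hnl : lastNL ((cs.drop start).take m) = none) :
    PySem.Chars.rfindFrom cs ['\n'] start (some ((start : Int) + m)) = -1 := by
  rw [rfindFrom_pre cs start m h, rfind_none _ hnl, if_pos rfl]

theorem rfindFrom_window_some (cs : List Char) (start m j : Nat)
    (h : (start : Int) + m < (cs.length : Int))
    (hnl : lastNL ((cs.drop start).take m) = some j) :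
    PySem.Chars.rfindFrom cs ['\n'] start (some ((start : Int) + m)) =
      ((start + j : Nat) : Int) := by
  rw [rfindFrom_pre cs start m h, rfind_some _ j hnl, if_neg (by omega)]
  push_cast
  ring

-- ---- A's loop = fSpec ----
theorem splitA_loop_succ (cs : List Char) (M : Int) (fuel : Nat) (start : Int) :
    splitA_loop cs M (fuel+1) start =
      if start < PySem.Chars.len cs then
        PySem.Chars.slice cs (some start)
            (some (if start + M < PySem.Chars.len cs then
              (if PySem.Chars.rfindFrom cs ['\n'] start (some (start + M)) + 1 ≤ start then
                start + M
              else PySem.Chars.rfindFrom cs ['\n'] start (some (start + M)) + 1)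
            else start + M)) ::
          splitA_loop cs M fuel
            (if start + M < PySem.Chars.len cs then
              (if PySem.Chars.rfindFrom cs ['\n'] start (some (start + M)) + 1 ≤ start then
                start + M
              else PySem.Chars.rfindFrom cs ['\n'] start (some (start + M)) + 1)
            else start + M)
      else [] := rfl

theorem splitA_loop_eq_fSpec (cs : List Char) (m : Nat) (hm : 1 ≤ m) :
    ∀ (fuel start : Nat), cs.length - start < fuel →
      splitA_loop cs (m : Int) fuel (start : Int) = fSpec m (cs.drop start) := by
  intro fuel
  induction fuel with
  | zero => intro start h; omega
  | succ fuel ih =>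
    intro start h
    have hlen : PySem.Chars.len cs = (cs.length : Int) := by
      simp [PySem.Chars.len]
    rw [splitA_loop_succ]
    by_cases hs : start < cs.length
    case neg =>
      rw [if_neg (by rw [hlen]; omega)]
      rw [List.drop_eq_nil_of_le (by omega), fSpec]
      simp
    case pos =>
      rw [if_pos (by rw [hlen]; omega)]
      have hr : cs.drop start ≠ [] := by
        simp only [ne_eq, List.drop_eq_nil_iff]
        omega
      have hrlen : (cs.drop start).length = cs.length - start := List.length_drop ..
      have hdd : ∀ k : Nat, (cs.drop start).drop k = cs.drop (start + k) := by
        intro k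
        rw [List.drop_drop]
      by_cases hlt : (start : Int) + (m : Int) < (cs.length : Int)
      · have hmlt : m < (cs.drop start).length := by omega
        rw [hlen, if_pos hlt]
        cases hnl : lastNL ((cs.drop start).take m) with
        | none =>
          rw [rfindFrom_window_none cs start m hlt hnl]
          rw [if_pos (by omega)]
          rw [fSpec, dif_neg hr]
          have hcut : cutK m (cs.drop start) = m := by
            rw [cutK, cutPos, if_neg (by omega), hnl]
            show max 1 m = m
            omega
          rw [hcut]
          congr 1
          · rw [PySem.Chars.slice_eq_listSlice, PySem.List.slice_natCast_add]
          · rw [show (start : Int) + (m : Int) = (((start + m : Nat)) : Int) by push_cast; ring]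
            rw [ih (start + m) (by omega), hdd]
        | some j =>
          have hj : j < m := by
            have := lastNL_lt_length _ _ hnl
            simp only [List.length_take] at this
            omega
          rw [rfindFrom_window_some cs start m j hlt hnl]
          rw [if_neg (by push_cast; omega)]
          rw [fSpec, dif_neg hr]
          have hcut : cutK m (cs.drop start) = j + 1 := by
            rw [cutK, cutPos, if_neg (by omega), hnl]
            show max 1 (j + 1) = j + 1
            omega
          have hfin : ((start + j : Nat) : Int) + 1 = (start : Int) + (((j+1) : Nat) : Int) := by
            push_cast
            ring
          rw [hcut, hfin]
          congr 1
          · rw [PySem.Chars.slice_eq_listSlice, PySem.List.slice_natCast_add]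
          · rw [show (start : Int) + (((j+1) : Nat) : Int) = (((start + (j+1)) : Nat) : Int) by
              push_cast; ring]
            rw [ih (start + (j+1)) (by omega), hdd]
      · rw [hlen, if_neg hlt]
        have hle : (cs.drop start).length ≤ m := by omega
        rw [fSpec, dif_neg hr]
        have hcut : cutK m (cs.drop start) = (cs.drop start).length := by
          rw [cutK, cutPos, if_pos hle]
          have h0 : (cs.drop start).length ≠ 0 := by
            intro h0
            exact hr (List.eq_nil_of_length_eq_zero h0)
          omega
        rw [hcut]
        congr 1
        · rw [PySem.Chars.slice_eq_listSlice, PySem.List.slice_natCast_add]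
          rw [List.take_of_length_le hle, List.take_length]
        · rw [show (start : Int) + (m : Int) = (((start + m : Nat)) : Int) by push_cast; ring]
          rw [ih (start + m) (by omega), hdd]
          rw [List.drop_eq_nil_of_le (show cs.length ≤ start + m by omega),
            List.drop_eq_nil_of_le
              (show cs.length ≤ start + (cs.drop start).length by omega)]

-- ---- chunk lemmas ----
theorem splitB_chunk_eq_chunks (m : Nat) (hm : 1 ≤ m) :
    ∀ (fuel : Nat) (L : List Char) (frags : List (List Char)), L.length ≤ fuel →
      splitB_chunk (m : Int) fuel frags L = (frags ++ (chunks m L).1, (chunks m L).2) := by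
  intro fuel
  induction fuel with
  | zero =>
    intro L frags hL
    have : L = [] := List.eq_nil_of_length_eq_zero (by omega)
    subst this
    rw [chunks]
    simp [splitB_chunk]
  | succ fuel ih =>
    intro L frags hL
    rw [splitB_chunk]
    have hlen : PySem.Chars.len L = (L.length : Int) := by simp [PySem.Chars.len]
    by_cases hbig : m < L.length
    · rw [if_pos (by rw [hlen]; exact_mod_cast hbig)]
      rw [PySem.Chars.slice_eq_listSlice, PySem.Chars.slice_eq_listSlice,
        PySem.List.slice_to_natCast, PySem.List.slice_from_natCast]
      rw [ih (L.drop m) _ (by simp only [List.length_drop]; omega)]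
      conv_rhs => rw [chunks]
      rw [dif_pos ⟨hbig, hm⟩]
      simp
    · rw [if_neg (by rw [hlen]; exact_mod_cast hbig)]
      rw [chunks, dif_neg (by intro hc; exact hbig hc.1)]
      simp

theorem chunks_props (m : Nat) (hm : 1 ≤ m) :
    ∀ (n : Nat) (L : List Char), L.length ≤ n → L ≠ [] →
      (chunks m L).2.length ≤ m ∧ (chunks m L).2 ≠ [] ∧
        (chunks m L).2.getLast? = L.getLast? := by
  intro n
  induction n with
  | zero =>
    intro L hL hne
    exact absurd (List.eq_nil_of_length_eq_zero (by omega)) hne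
  | succ n ih =>
    intro L hL hne
    rw [chunks]
    by_cases hbig : m < L.length
    · rw [dif_pos ⟨hbig, hm⟩]
      have hd : (L.drop m).length = L.length - m := List.length_drop ..
      have hdne : L.drop m ≠ [] := by
        intro hc
        have := congrArg List.length hc
        simp at this
        omega
      have := ih (L.drop m) (by omega) hdne
      exact ⟨this.1, this.2.1, this.2.2.trans (pvGetLast?_drop_of_lt _ _ hbig)⟩
    · rw [dif_neg (by intro hc; exact hbig hc.1)]
      refine ⟨?_, hne, rfl⟩
      show L.length ≤ m
      omega

theorem fSpec_chunks (m : Nat) (hm : 1 ≤ m) :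
    ∀ (n : Nat) (L rest : List Char), L.length ≤ n → m < L.length → '\n' ∉ L.dropLast →
      fSpec m (L ++ rest) = (chunks m L).1 ++ fSpec m ((chunks m L).2 ++ rest) := by
  intro n
  induction n with
  | zero => intro L rest hL hbig _; omega
  | succ n ih =>
    intro L rest hL hbig hnl
    have hstep : fSpec m (L ++ rest) = L.take m :: fSpec m (L.drop m ++ rest) := by
      rw [fSpec, dif_neg (by
        intro hc
        have hlc : L.length + rest.length = 0 := by
          rw [← List.length_append, hc]
          rfl
        omega)]
      have htake : (L ++ rest).take m = L.take m := by
        rw [List.take_append]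
        have : m - L.length = 0 := by omega
        simp [this]
      have hcut : cutK m (L ++ rest) = m := by
        rw [cutK, cutPos, if_neg (by rw [List.length_append]; omega), htake]
        rw [(lastNL_eq_none_iff _).mpr (pvNotNL_take L m hbig hnl)]
        show max 1 m = m
        omega
      rw [hcut, htake]
      congr 1
      rw [List.drop_append]
      have : m - L.length = 0 := by omega
      simp [this]
    rw [chunks, dif_pos ⟨hbig, hm⟩]
    by_cases hbig2 : m < (L.drop m).length
    · rw [hstep]
      rw [ih (L.drop m) rest (by simp [List.length_drop]; omega) hbig2
        (by rw [pvDropLast_drop]; intro hc; exact hnl (List.drop_subset _ _ hc))]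
      simp
    · have hch : chunks m (L.drop m) = ([], L.drop m) := by
        rw [chunks, dif_neg (by intro hc; exact hbig2 hc.1)]
      rw [hstep, hch]
      simp

-- ---- evaluating one step of B's fold ----
theorem step_fit (m : Nat) (fr : List (List Char)) (acc L : List Char)
    (h : acc.length + L.length ≤ m) :
    splitB_step (m : Int) (fr, acc) L = (fr, acc ++ L) := by
  simp only [splitB_step, PySem.Chars.len]
  rw [if_pos (by push_cast; omega)]

theorem step_close (m : Nat) (fr : List (List Char)) (acc L : List Char)
    (h1 : m < acc.length + L.length) (h2 : L.length ≤ m) :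
    splitB_step (m : Int) (fr, acc) L =
      ((if acc ≠ [] then fr ++ [acc] else fr), L) := by
  simp only [splitB_step, PySem.Chars.len]
  rw [if_neg (by push_cast; omega), if_pos (by push_cast; omega)]

theorem step_chunk (m : Nat) (hm : 1 ≤ m) (fr : List (List Char)) (acc L : List Char)
    (h2 : m < L.length) :
    splitB_step (m : Int) (fr, acc) L =
      ((if acc ≠ [] then fr ++ [acc] else fr) ++ (chunks m L).1, (chunks m L).2) := by
  simp only [splitB_step, PySem.Chars.len]
  rw [if_neg (by push_cast; omega), if_neg (by push_cast; omega)]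
  rw [splitB_chunk_eq_chunks m hm L.length L _ (le_refl _)]

theorem splitB_step_shift (m : Nat) (hm : 1 ≤ m) (fr : List (List Char)) (acc L : List Char) :
    splitB_step (m : Int) (fr, acc) L =
      (fr ++ (splitB_step (m : Int) ([], acc) L).1, (splitB_step (m : Int) ([], acc) L).2) := by
  by_cases h1 : acc.length + L.length ≤ m
  · rw [step_fit m fr acc L h1, step_fit m [] acc L h1]
    simp
  · by_cases h2 : L.length ≤ m
    · rw [step_close m fr acc L (by omega) h2, step_close m [] acc L (by omega) h2]
      by_cases ha : acc = [] <;> simp [ha]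
    · rw [step_chunk m hm fr acc L (by omega), step_chunk m hm [] acc L (by omega)]
      by_cases ha : acc = [] <;> simp [ha]

theorem finishB_foldl_shift (m : Nat) (hm : 1 ≤ m) :
    ∀ (ls : List (List Char)) (fr : List (List Char)) (acc : List Char),
      finishB (ls.foldl (splitB_step (m : Int)) (fr, acc)) =
        fr ++ finishB (ls.foldl (splitB_step (m : Int)) ([], acc)) := by
  intro ls
  induction ls with
  | nil =>
    intro fr acc
    by_cases ha : acc = [] <;> simp [finishB, ha]
  | cons L ls ih =>
    intro fr acc
    rw [List.foldl_cons, List.foldl_cons, splitB_step_shift m hm fr acc L]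
    rw [ih (fr ++ (splitB_step (↑m) ([], acc) L).1) (splitB_step (↑m) ([], acc) L).2]
    rw [List.append_assoc]
    congr 1
    rcases hst : splitB_step (↑m) ([], acc) L with ⟨f2, a2⟩
    rw [← ih f2 a2]

-- ---- fSpec building blocks ----
theorem fSpec_nil (m : Nat) : fSpec m [] = [] := by rw [fSpec]; simp

theorem fSpec_single (m : Nat) (acc : List Char) (h1 : acc ≠ []) (h2 : acc.length ≤ m) :
    fSpec m acc = [acc] := by
  rw [fSpec, dif_neg h1]
  have hcut : cutK m acc = acc.length := by
    rw [cutK, cutPos, if_pos h2]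
    have : acc.length ≠ 0 := by
      intro h0
      exact h1 (List.eq_nil_of_length_eq_zero h0)
    omega
  rw [hcut, List.take_length, List.drop_length, fSpec_nil]

theorem fSpec_cut_acc (m : Nat) (acc X : List Char) (hne : acc ≠ [])
    (hlast : acc.getLast? = some '\n') (hlen : acc.length ≤ m)
    (hX : '\n' ∉ X.take (m - acc.length)) (hbig : m < acc.length + X.length) :
    fSpec m (acc ++ X) = acc :: fSpec m X := by
  rw [fSpec, dif_neg (by simp [hne])]
  have hcut : cutK m (acc ++ X) = acc.length := by
    rw [cutK, cutPos, if_neg (by simp [List.length_append]; omega)]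
    have ht : (acc ++ X).take m = acc ++ X.take (m - acc.length) := by
      rw [List.take_append, List.take_of_length_le hlen]
    rw [ht, lastNL_append, (lastNL_eq_none_iff _).mpr hX]
    rw [lastNL_getLast_newline acc hlast]
    have hpos : acc.length ≠ 0 := by
      intro h0
      exact hne (List.eq_nil_of_length_eq_zero h0)
    show max 1 (acc.length - 1 + 1) = acc.length
    omega
  rw [hcut]
  congr 1
  · rw [List.take_left]
  · rw [List.drop_left]

-- ---- MAIN: fSpec agrees with B's greedy line packing ----
theorem main_pack (m : Nat) (hm : 1 ≤ m) :
    ∀ (ls : List (List Char)) (acc : List Char), goodLines ls →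
      acc.length ≤ m → (acc ≠ [] → ls ≠ [] → acc.getLast? = some '\n') →
      fSpec m (acc ++ ls.flatten) = finishB (ls.foldl (splitB_step (m : Int)) ([], acc)) := by
  intro ls
  induction ls with
  | nil =>
    intro acc _ hlen _
    simp only [List.flatten_nil, List.append_nil, List.foldl_nil]
    by_cases ha : acc = []
    · subst ha
      rw [fSpec_nil]
      simp [finishB]
    · rw [fSpec_single m acc ha hlen]
      simp [finishB, ha]
  | cons L ls ih =>
    intro acc hgood hlen hlast
    obtain ⟨hLne, hLnl, hLlast, hgood'⟩ := hgood
    have hLpos : 0 < L.length := List.length_pos_of_ne_nil hLne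
    rw [List.foldl_cons, List.flatten_cons]
    by_cases hfit : acc.length + L.length ≤ m
    · rw [step_fit m [] acc L hfit]
      have hih := ih (acc ++ L) hgood'
        (by simp only [List.length_append]; exact hfit)
        (by
          intro _ hls
          rw [pvGetLast?_append_right acc L hLne]
          exact hLlast hls)
      rw [← List.append_assoc]
      exact hih
    · have hfit' : m < acc.length + L.length := by omega
      have hcutA : acc ≠ [] → fSpec m (acc ++ (L ++ ls.flatten)) =
          acc :: fSpec m (L ++ ls.flatten) := by
        intro hane
        apply fSpec_cut_acc m acc (L ++ ls.flatten) hane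
          (hlast hane (by simp)) hlen
        · have ht : m - acc.length < L.length := by omega
          have : (L ++ ls.flatten).take (m - acc.length) = L.take (m - acc.length) := by
            rw [List.take_append]
            have h0 : m - acc.length - L.length = 0 := by omega
            simp [h0]
          rw [this]
          exact pvNotNL_take L _ ht hLnl
        · simp only [List.length_append]
          omega
      by_cases hsmall : L.length ≤ m
      · have hane : acc ≠ [] := by
          intro hc
          subst hc
          simp at hfit
          omega
        rw [step_close m [] acc L hfit' hsmall, if_pos hane]
        rw [finishB_foldl_shift m hm ls ([] ++ [acc]) L]
        rw [hcutA hane]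
        have hih := ih L hgood' hsmall (fun _ hls => hLlast hls)
        rw [hih]
        simp
      · have hbig : m < L.length := by omega
        rw [step_chunk m hm [] acc L hbig]
        obtain ⟨hRlen, hRne, hRlast⟩ := chunks_props m hm L.length L (le_refl _) hLne
        rw [finishB_foldl_shift m hm ls _ (chunks m L).2]
        have hih := ih (chunks m L).2 hgood' hRlen
          (fun _ hls => hRlast.trans (hLlast hls))
        by_cases ha : acc = []
        · subst ha
          simp only [List.nil_append]
          rw [fSpec_chunks m hm L.length L ls.flatten (le_refl _) hbig hLnl, hih]
          simp
        · rw [hcutA ha]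
          rw [fSpec_chunks m hm L.length L ls.flatten (le_refl _) hbig hLnl, hih]
          simp [ha]

-- ---- splitOn / toLines ----
theorem consHead_nil_of_ne (X : List (List Char)) (h : X ≠ []) : consHead [] X = X := by
  cases X with
  | nil => exact absurd rfl h
  | cons q qs => simp [consHead]

theorem consHead_consHead (p : List Char) (c : Char) (X : List (List Char)) :
    consHead p (consHead [c] X) = consHead (p ++ [c]) X := by
  cases X with
  | nil => simp [consHead]
  | cons q qs => simp [consHead]

theorem mySplit_ne_nil (l : List Char) : mySplit l ≠ [] := by
  cases l with
  | nil => simp [mySplit]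
  | cons c rest =>
    rw [mySplit]
    by_cases hc : c = '\n'
    · simp [hc]
    · rw [if_neg hc]
      cases h : mySplit rest with
      | nil => simp [consHead]
      | cons q qs => simp [consHead]

theorem go_eq_mySplit :
    ∀ (l : List Char) (fuel : Nat), l.length ≤ fuel → ∀ (cur : List Char) (acc : List (List Char)),
      PySem.Chars.splitOn.go ['\n'] fuel l cur acc =
        acc.reverse ++ consHead cur.reverse (mySplit l) := by
  intro l
  induction l with
  | nil =>
    intro fuel _ cur acc
    cases fuel with
    | zero => rw [PySem.Chars.splitOn.go.eq_1]; simp [mySplit, consHead]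
    | succ f =>
      rw [PySem.Chars.splitOn.go.eq_2 _ _ _ _ (by omega)]
      simp [mySplit, consHead]
  | cons c rest ih =>
    intro fuel hf cur acc
    cases fuel with
    | zero => simp at hf
    | succ f =>
      rw [PySem.Chars.splitOn.go.eq_3]
      by_cases hc : '\n' = c
      · rw [if_pos (by subst hc; simp [List.isPrefixOf])]
        simp only [List.length_singleton, List.drop_succ_cons, List.drop_zero]
        rw [ih f (by simp at hf; omega) [] (cur.reverse :: acc)]
        rw [mySplit, if_pos hc.symm]
        simp only [List.reverse_cons, List.reverse_nil]
        rw [consHead_nil_of_ne _ (mySplit_ne_nil rest)]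
        cases h : mySplit rest with
        | nil => exact absurd h (mySplit_ne_nil rest)
        | cons q qs => simp [consHead]
      · rw [if_neg (by simp [List.isPrefixOf]; exact hc)]
        rw [ih f (by simp at hf; omega) (c :: cur) acc]
        rw [mySplit, if_neg (fun he => hc he.symm)]
        simp only [List.reverse_cons]
        rw [consHead_consHead]

theorem splitOn_eq_mySplit (l : List Char) : PySem.Chars.splitOn l ['\n'] = mySplit l := by
  rw [PySem.Chars.splitOn]
  rw [go_eq_mySplit l (l.length + 1) (by omega) [] []]
  simp only [List.reverse_nil, List.nil_append]
  exact consHead_nil_of_ne _ (mySplit_ne_nil l)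

theorem linesOf_eq (parts : List (List Char)) (h : parts ≠ []) :
    parts.dropLast.map (fun p => p ++ ['\n']) ++
      (if parts.getLastD [] ≠ [] then [parts.getLastD []] else []) = linesOf parts := by
  induction parts with
  | nil => exact absurd rfl h
  | cons p ps ih =>
    cases ps with
    | nil => simp [linesOf]
    | cons q qs =>
      rw [show (p :: q :: qs).dropLast = p :: (q :: qs).dropLast from rfl]
      rw [show (p :: q :: qs).getLastD [] = (q :: qs).getLastD [] from rfl]
      rw [List.map_cons, List.cons_append]
      rw [ih (by simp)]
      rfl

theorem linesOf_mySplit (cs : List Char) : linesOf (mySplit cs) = toLines cs := by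
  induction cs with
  | nil => simp [mySplit, linesOf, toLines]
  | cons c rest ih =>
    obtain ⟨q, qs, h⟩ : ∃ q qs, mySplit rest = q :: qs := by
      cases h : mySplit rest with
      | nil => exact absurd h (mySplit_ne_nil rest)
      | cons q qs => exact ⟨q, qs, rfl⟩
    rw [h] at ih
    by_cases hc : c = '\n'
    · rw [mySplit, if_pos hc, toLines, if_pos hc, h]
      show (([] : List Char) ++ ['\n']) :: linesOf (q :: qs) = ['\n'] :: toLines rest
      rw [ih]
      simp
    · rw [mySplit, if_neg hc, toLines, if_neg hc, h]
      show linesOf ((c :: q) :: qs) = _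
      cases qs with
      | nil =>
        by_cases hq : q = []
        · subst hq
          have hrest : toLines rest = [] := by
            rw [← ih]
            simp [linesOf]
          rw [hrest]
          simp [linesOf]
        · have hrest : toLines rest = [q] := by
            rw [← ih]
            simp [linesOf, hq]
          rw [hrest]
          simp [linesOf, hq]
      | cons q2 qs2 =>
        have hrest : toLines rest = (q ++ ['\n']) :: linesOf (q2 :: qs2) := by
          rw [← ih]
          rfl
        rw [hrest]
        show ((c :: q) ++ ['\n']) :: linesOf (q2 :: qs2) = _
        simp

theorem flatten_toLines (cs : List Char) : (toLines cs).flatten = cs := by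
  induction cs with
  | nil => simp [toLines]
  | cons c rest ih =>
    rw [toLines]
    by_cases hc : c = '\n'
    · rw [if_pos hc]
      simp [hc, ih]
    · rw [if_neg hc]
      cases h : toLines rest with
      | nil =>
        rw [h] at ih
        simp at ih
        simp [← ih]
      | cons l ls =>
        rw [h] at ih
        simp only [List.flatten_cons] at ih ⊢
        simp [← ih]

theorem goodLines_toLines (cs : List Char) : goodLines (toLines cs) := by
  induction cs with
  | nil => simp [toLines, goodLines]
  | cons c rest ih =>
    rw [toLines]
    by_cases hc : c = '\n'
    · rw [if_pos hc]
      refine ⟨by simp, by simp, ?_, ih⟩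
      intro hls
      cases h : toLines rest with
      | nil => exact absurd h hls
      | cons l ls => simp
    · rw [if_neg hc]
      cases h : toLines rest with
      | nil => exact ⟨by simp, by simp, by simp [hc], trivial⟩
      | cons l ls =>
        rw [h] at ih
        obtain ⟨hl1, hl2, hl3, hl4⟩ := ih
        refine ⟨by simp, ?_, ?_, hl4⟩
        · rw [List.dropLast_cons_of_ne_nil hl1]
          simp only [List.mem_cons, not_or]
          exact ⟨fun he => hc he.symm, hl2⟩
        · intro hls
          cases l with
          | nil => exact absurd rfl hl1
          | cons x xs =>
            rw [List.getLast?_cons_cons]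
            exact hl3 hls

-- ---- assembling the two ports ----
theorem portA_eq (cs : List Char) (m : Nat) (hm : 1 ≤ m) :
    splitA_loop cs (m : Int) (cs.length + 1) 0 = fSpec m cs := by
  have := splitA_loop_eq_fSpec cs m hm (cs.length + 1) 0 (by omega)
  simpa using this

theorem portB_eq (cs : List Char) (m : Nat) (hm : 1 ≤ m) :
    (let parts := PySem.Chars.splitOn cs ['\n']
     let lines := (PySem.List.slice parts none (some (-1))).map (fun p => p ++ ['\n'])
     let lines := lines ++
       (if PySem.List.pyGetD parts (-1) [] ≠ [] then [PySem.List.pyGetD parts (-1) []] else [])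
     let st := lines.foldl (splitB_step (m : Int)) ([], [])
     (if st.2 ≠ [] then st.1 ++ [st.2] else st.1)) = fSpec m cs := by
  have hsp : PySem.Chars.splitOn cs ['\n'] = mySplit cs := splitOn_eq_mySplit cs
  have hne : mySplit cs ≠ [] := mySplit_ne_nil cs
  simp only [hsp]
  rw [PySem.List.slice_to_neg_one]
  have hpg : PySem.List.pyGetD (mySplit cs) (-1) [] = (mySplit cs).getLastD [] := by
    rw [PySem.List.pyGetD_neg_one (mySplit cs) [] hne]
    rw [List.getLastD_eq_getLast?, List.getLast?_eq_getLast hne]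
    rfl
  rw [hpg, linesOf_eq (mySplit cs) hne, linesOf_mySplit cs]
  have := main_pack m hm (toLines cs) [] (goodLines_toLines cs) (by simp)
    (fun hc _ => absurd rfl hc)
  rw [flatten_toLines] at this
  simp only [List.nil_append] at this
  show finishB ((toLines cs).foldl (splitB_step (m : Int)) ([], [])) = fSpec m cs
  exact this.symm

theorem empty_portA (M : Int) : split_text_by_bytes "" M = [] := by
  rfl

theorem empty_portB (M : Int) : split_text_by_bytes_alt "" M = [] := by
  rfl

-- ===== VERDICT (by name: the statement is the Claim_ definition above) =====
theorem split_text_by_bytes_spec : Claim_equal_split_text_by_bytes := by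
  intro text M _ hpre
  unfold Spec_split_text_by_bytes
  rcases hpre with hempty | hM
  · subst hempty
    rw [empty_portA, empty_portB]
  · unfold split_text_by_bytes split_text_by_bytes_alt
    congr 1
    have hm : 1 ≤ M.toNat := by omega
    have hMm : ((M.toNat : Int)) = M := by omega
    rw [← hMm]
    rw [portA_eq text.toList M.toNat hm]
    rw [portB_eq text.toList M.toNat hm]
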